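-- pv_equiv track=rewrite | github.com/dark9266/- | src/adapters/patagonia_adapter.py | _group_sizes_by_color
-- ===== SOURCE A (Python) =====
-- def _group_sizes_by_color(item: dict) -> dict[str, list[dict]]:
--     """item.sizes ([{size, color, in_stock, stock}, ...]) → {color_code: [size_row, ...]}.
--
--     crawler 의 parse_sizes_from_options 가 size 행마다 color 코드를
--     보존하고 있어 그대로 그룹화. 색상 코드 없는 size 는 빈 키 ""로 묶임.
--     """
--     groups: dict[str, list[dict]] = {}
--     for s in item.get("sizes") or []:
--         if not isinstance(s, dict):
--             continue
--         code = (s.get("color") or "").strip().upper()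
--         groups.setdefault(code, []).append(s)
--     return groups
-- ===== SOURCE B (Python) =====
-- def _group_sizes_by_color(item: dict) -> dict[str, list[dict]]:
--     def key(s):
--         return (s.get("color") or "").strip().upper()
--
--     def go(rs):
--         # recursive partition: peel off the first color's whole group, recurse on the rest
--         if not rs:
--             return {}
--         k = key(rs[0])
--         d = {k: [s for s in rs if key(s) == k]}
--         d.update(go([s for s in rs if key(s) != k]))
--         return d
--
--     return go([s for s in (item.get("sizes") or []) if isinstance(s, dict)])
-- ===== Notes on version B (the rewrite author's own statement) =====
-- stated objective: alternative
-- what changed: Replaces A's one-pass scatter into a dict via setdefault/append by a recursive partition: take the first row's color key, collect its whole group by filtering, and recurse on the remaining rows; first-occurrence key order and stable filtering reproduce A's groups exactly.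
import Mathlib
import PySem

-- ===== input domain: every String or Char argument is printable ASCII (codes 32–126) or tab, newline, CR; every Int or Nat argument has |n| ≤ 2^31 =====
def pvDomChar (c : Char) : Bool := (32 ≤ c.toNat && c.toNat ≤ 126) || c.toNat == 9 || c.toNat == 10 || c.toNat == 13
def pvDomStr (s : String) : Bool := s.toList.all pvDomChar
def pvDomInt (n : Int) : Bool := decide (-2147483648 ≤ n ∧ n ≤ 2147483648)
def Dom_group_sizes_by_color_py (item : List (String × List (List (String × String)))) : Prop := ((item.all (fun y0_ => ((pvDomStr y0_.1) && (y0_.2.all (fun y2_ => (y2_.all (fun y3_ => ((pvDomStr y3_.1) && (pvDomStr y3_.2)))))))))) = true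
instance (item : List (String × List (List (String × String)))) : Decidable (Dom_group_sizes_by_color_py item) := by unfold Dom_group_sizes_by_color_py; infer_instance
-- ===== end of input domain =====

-- B replaces A's one-pass setdefault/append scatter with a recursive partition: peel off the
-- first row's whole color group by filtering, recurse on the rest (alternative decomposition).

-- ===== PORT A =====
-- (s.get("color") or "").strip().upper() — the key expression both sources use
def pvColorKey (s : List (String × String)) : String :=
  PySem.Str.upper (PySem.Str.strip (((PySem.Dict.mk s).get? "color").getD ""))

-- A: for s in item.get("sizes") or []: groups.setdefault(code, []).append(s)
-- (the isinstance(s, dict) guard is always true under the typed domain); setdefault+append = modify code [] (· ++ [s])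
def group_sizes_by_color_py (item : List (String × List (List (String × String)))) : List (String × List (List (String × String))) :=
  let sizes := ((PySem.Dict.mk item).get? "sizes").getD []
  (sizes.foldl (fun g s => g.modify (pvColorKey s) [] (· ++ [s]))
    (PySem.Dict.empty : PySem.Dict String (List (List (String × String))))).items

-- ===== PORT B =====
-- B's go(rs): {k: [s in rs with key==k]} then d.update(go([s in rs with key != k]));
-- every key produced by the recursive call differs from k, so dict.update appends after k = cons.
def pvGo (rows : List (List (String × String))) : List (String × List (List (String × String))) :=
  match rows with
  | [] => []
  | s :: t =>
    (pvColorKey s, (s :: t).filter (fun r => pvColorKey r == pvColorKey s)) ::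
      pvGo (t.filter (fun r => pvColorKey r != pvColorKey s))
termination_by rows.length
decreasing_by
  simp only [List.length_unattach, List.length_cons]
  exact Nat.lt_succ_of_le (le_trans (List.length_filter_le _ _) (by simp))

def group_sizes_by_color_py_alt (item : List (String × List (List (String × String)))) : List (String × List (List (String × String))) :=
  pvGo (((PySem.Dict.mk item).get? "sizes").getD [])

-- ===== PRECONDITION & SPEC =====
def Spec_group_sizes_by_color_py (item : List (String × List (List (String × String)))) (out : List (String × List (List (String × String)))) : Prop := out = group_sizes_by_color_py_alt item
instance (item : List (String × List (List (String × String)))) (out : List (String × List (List (String × String)))) : Decidable (Spec_group_sizes_by_color_py item out) := by unfold Spec_group_sizes_by_color_py; infer_instance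

-- ===== CLAIM (what is proved, stated in full; the proofs are below) =====
def Claim_equal_group_sizes_by_color_py : Prop := ∀ (item : List (String × List (List (String × String)))), Dom_group_sizes_by_color_py item → Spec_group_sizes_by_color_py item (group_sizes_by_color_py item)

-- ===== LEMMAS AND PROOFS =====

-- folding Set.add skips any element already present in the accumulator
theorem pv_foldl_add_skip {α : Type} [BEq α] [LawfulBEq α] (x : α) (ys : List α) :
    ∀ (acc : List α), x ∈ acc →
      List.foldl PySem.Set.add acc ys = List.foldl PySem.Set.add acc (ys.filter (fun y => y != x)) := by
  induction ys with
  | nil => intro acc _; rfl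
  | cons y t ih =>
    intro acc hx
    by_cases hyx : y = x
    · subst hyx
      have hadd : PySem.Set.add acc y = acc := by
        simp [PySem.Set.add, PySem.Set.contains, hx]
      simp [List.foldl_cons, hadd, ih acc hx]
    · have hkeep : (y != x) = true := by simp [hyx]
      have hx' : x ∈ PySem.Set.add acc y := by
        simp only [PySem.Set.add]
        split <;> simp [hx]
      simp [List.foldl_cons, hkeep, ih _ hx']

-- a head element not occurring later stays in front of the fold
theorem pv_foldl_add_head {α : Type} [BEq α] [LawfulBEq α] (x : α) (ys : List α)
    (h : ∀ y ∈ ys, (y == x) = false) :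
    ∀ (acc : List α), List.foldl PySem.Set.add (x :: acc) ys = x :: List.foldl PySem.Set.add acc ys := by
  induction ys with
  | nil => intro acc; rfl
  | cons y t ih =>
    intro acc
    have hy : (y == x) = false := h y (by simp)
    have hadd : PySem.Set.add (x :: acc) y = x :: PySem.Set.add acc y := by
      have hne : ¬ y = x := by simpa using hy
      simp only [PySem.Set.add, PySem.Set.contains]
      by_cases hm : y ∈ acc
      · simp [hm]
      · simp [hm, hne]
    simp only [List.foldl_cons, hadd]
    exact ih (fun z hz => h z (by simp [hz])) _

theorem pv_dedup_cons {α : Type} [BEq α] [LawfulBEq α] (x : α) (xs : List α) :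
    PySem.List.dedup (x :: xs) = x :: PySem.List.dedup (xs.filter (fun y => y != x)) := by
  have h0 : PySem.List.dedup (x :: xs) = List.foldl PySem.Set.add [x] xs := by
    simp [PySem.List.dedup, PySem.Set.ofList, PySem.Set.add, PySem.Set.empty, PySem.Set.contains]
  rw [h0, pv_foldl_add_skip x xs [x] (by simp)]
  have hne : ∀ y ∈ xs.filter (fun y => y != x), (y == x) = false := by
    intro y hy
    have := List.of_mem_filter hy
    simpa using this
  have := pv_foldl_add_head x (xs.filter (fun y => y != x)) hne []
  simpa [PySem.List.dedup, PySem.Set.ofList, PySem.Set.empty] using this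

-- B's recursive partition computes the dedup-the-keys-then-filter normal form
theorem pv_go_eq (rows : List (List (String × String))) :
    pvGo rows = (PySem.List.dedup (rows.map pvColorKey)).map
      (fun code => (code, rows.filter (fun s => pvColorKey s == code))) := by
  induction hn : rows.length using Nat.strong_induction_on generalizing rows with
  | _ n ih =>
    match rows with
    | [] => simp [pvGo, PySem.List.dedup, PySem.Set.ofList, PySem.Set.empty]
    | s :: t =>
      have hlen : (t.filter (fun r => pvColorKey r != pvColorKey s)).length < n := by
        subst hn
        exact Nat.lt_succ_of_le (List.length_filter_le _ _)
      have hrec := ih _ hlen (t.filter (fun r => pvColorKey r != pvColorKey s)) rfl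
      have hmapfilter : (t.filter (fun r => pvColorKey r != pvColorKey s)).map pvColorKey
          = (t.map pvColorKey).filter (fun y => y != pvColorKey s) := by
        simp [List.filter_map, Function.comp_def]
      have hstep : pvGo (s :: t)
          = (pvColorKey s, (s :: t).filter (fun r => pvColorKey r == pvColorKey s)) ::
              pvGo (t.filter (fun r => pvColorKey r != pvColorKey s)) := by
        simp only [pvGo]
      rw [hstep, hrec, List.map_cons, pv_dedup_cons, hmapfilter, List.map_cons]
      refine congrArg₂ List.cons rfl ?_
      apply List.map_congr_left
      intro c hc
      have hcne : (c == pvColorKey s) = false := by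
        have h1 := (PySem.List.mem_dedup _ c).mp hc
        have h2 := List.of_mem_filter h1
        simpa using h2
      refine congrArg (Prod.mk c) ?_
      have hhead : (s :: t).filter (fun r => pvColorKey r == c)
          = t.filter (fun r => pvColorKey r == c) := by
        simp only [List.filter_cons]
        have h3 : (pvColorKey s == c) = false := by
          simp only [beq_eq_false_iff_ne] at hcne ⊢
          exact fun he => hcne he.symm
        simp [h3]
      rw [hhead, List.filter_filter]
      apply List.filter_congr
      intro r _
      by_cases hrc : pvColorKey r = c
      · simp [hrc]
        exact beq_eq_false_iff_ne.mp hcne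
      · simp [hrc]

-- A's dict fold computes the same normal form
theorem pv_group_eq (rows : List (List (String × String))) :
    (rows.foldl (fun g s => g.modify (pvColorKey s) [] (· ++ [s]))
      (PySem.Dict.empty : PySem.Dict String (List (List (String × String))))).items
    = (PySem.List.dedup (rows.map pvColorKey)).map
        (fun code => (code, rows.filter (fun s => pvColorKey s == code))) := by
  have hnd : (rows.foldl (fun g s => g.modify (pvColorKey s) [] (· ++ [s]))
      (PySem.Dict.empty : PySem.Dict String (List (List (String × String))))).keys.Nodup :=
    PySem.Dict.nodup_keys_foldl_modify_key rows pvColorKey [] (fun _ s => (· ++ [s])) _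
      (by simp [PySem.Dict.keys_empty])
  rw [PySem.Dict.items_eq_map_keys _ hnd []]
  have hkeys : (rows.foldl (fun g s => g.modify (pvColorKey s) [] (· ++ [s]))
      (PySem.Dict.empty : PySem.Dict String (List (List (String × String))))).keys
      = PySem.List.dedup (rows.map pvColorKey) := by
    rw [PySem.Dict.keys_foldl_modify_key]
    simp [PySem.Dict.keys_empty, PySem.Set.update, PySem.Set.ofList_eq_foldl, PySem.List.dedup_eq_ofList]
  rw [hkeys]
  apply List.map_congr_left
  intro code _
  congr 1
  have hfold : rows.foldl (fun g s => g.modify (pvColorKey s) [] (· ++ [s]))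
      (PySem.Dict.empty : PySem.Dict String (List (List (String × String))))
      = (rows.map (fun s => (pvColorKey s, s))).foldl (fun g p => g.modify p.1 [] (· ++ [p.2]))
        PySem.Dict.empty := by
    rw [List.foldl_map]
  rw [hfold, PySem.Dict.getD_foldl_modify_append]
  simp [PySem.Dict.getD_empty, List.filter_map, Function.comp_def]

-- ===== VERDICT (by name: the statement is the Claim_ definition above) =====
theorem group_sizes_by_color_py_spec : Claim_equal_group_sizes_by_color_py := by
  intro item _
  unfold Spec_group_sizes_by_color_py group_sizes_by_color_py group_sizes_by_color_py_alt
  rw [pv_group_eq, pv_go_eq]
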